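-- pv_equiv track=rewrite | github.com/MrBrantCode/unitest_baseline | mut_generate/mist_train_taco/taco_5448/solution.py | count_zero_and_groups
-- ===== SOURCE A (Python) =====
-- def count_zero_and_groups(n, a):
--     M = 10**9 + 7
--
--     # Determine the maximum bit length of the elements in the array
--     m = max(a).bit_length()
--
--     # Initialize the count array for bitwise AND results
--     v = [0] * (1 << m)
--
--     # Count occurrences of each bitwise AND result
--     for item in a:
--         v[item] += 1
--
--     # Precompute powers of 2 modulo M
--     v2 = [1]
--     for i in range(n + 1):
--         v2.append(v2[-1] * 2 % M)
--
--     # Apply zeta transform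
--     nv = zeta_super(v, m)
--
--     # Calculate the final answer
--     ans = 0
--     for b in range(1 << m):
--         ans += (v2[nv[b]] - 1) * pow(-1, bin(b).count('1'))
--         ans %= M
--
--     return ans % M
--
-- def zeta_super(val, n):
--     out = val[:]
--     for i in range(n):
--         for j in range(1 << n):
--             if not j >> i & 1:
--                 out[j] += out[j ^ 1 << i]
--     return out
-- ===== SOURCE B (Python) =====
-- def count_zero_and_groups(n, a):
--     M = 10**9 + 7
--     m = max(a).bit_length()
--     ans = 0
--     for b in range(1 << m):
--         c = 0
--         for x in a:
--             if x & b == b: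
--                 c += 1
--         sign = -1 if bin(b).count('1') % 2 else 1
--         ans = (ans + (pow(2, c, M) - 1) * sign) % M
--     return ans % M
-- ===== Notes on version B (the rewrite author's own statement) =====
-- stated objective: simpler
-- what changed: B drops A's zeta-transform (subset-sum DP) table, the occurrence array and the precomputed power table, and instead, for each mask b, rescans the array to count elements x with x & b == b and accumulates (pow(2,c,M)-1) times the parity sign directly.
import Mathlib
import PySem

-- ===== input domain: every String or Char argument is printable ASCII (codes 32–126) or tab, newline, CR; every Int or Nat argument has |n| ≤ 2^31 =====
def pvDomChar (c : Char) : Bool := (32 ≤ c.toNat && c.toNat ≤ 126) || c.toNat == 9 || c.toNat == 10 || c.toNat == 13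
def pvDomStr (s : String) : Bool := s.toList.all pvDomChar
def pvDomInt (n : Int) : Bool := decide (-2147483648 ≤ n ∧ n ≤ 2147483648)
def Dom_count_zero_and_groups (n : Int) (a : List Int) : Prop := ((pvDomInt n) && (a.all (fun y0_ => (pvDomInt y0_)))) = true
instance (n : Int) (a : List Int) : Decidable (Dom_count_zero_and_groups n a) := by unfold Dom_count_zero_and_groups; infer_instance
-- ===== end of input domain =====

-- B replaces A's subset-sum (zeta-transform) DP table and precomputed power table by a direct
-- per-mask rescan of the array computing the same superset counts; objective: simpler.

-- ===== PORT A =====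
-- Python list indexing/assignment, on an Array (Python lists are O(1)-indexed); the index is
-- resolved exactly as Python does (negative = from the end) via PySem.List.pyIdx?; the `none`
-- branch is Python's IndexError, excluded by Pre_ (junk: unchanged / default).
def pyArrGetD (v : Array Int) (i : Int) (d : Int) : Int :=
  match PySem.List.pyIdx? v.size i with
  | some k => v.getD k d
  | none => d

def pyArrSetD (v : Array Int) (i : Int) (x : Int) : Array Int :=
  match PySem.List.pyIdx? v.size i with
  | some k => v.setIfInBounds k x
  | none => v

-- body of the inner `for j in range(1 << n)` loop of zeta_super (`not j >> i & 1` ⇔ (j>>>i)&&&1 = 0)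
def zetaStep (i : Nat) (out : Array Int) (j : Nat) : Array Int :=
  if (j >>> i) &&& 1 = 0 then
    out.setIfInBounds j (out.getD j 0 + out.getD (j ^^^ (1 <<< i)) 0)
  else out

def zetaInner (i : Nat) (N : Nat) (out : Array Int) : Array Int :=
  (List.range N).foldl (zetaStep i) out

def zeta_super (val : Array Int) (n : Nat) : Array Int :=
  (List.range n).foldl (fun out i => zetaInner i (1 <<< n) out) val

def count_zero_and_groups (n : Int) (a : List Int) : Int :=
  let M : Int := 1000000007
  -- max(a).bit_length(); ValueError on empty a is excluded by Pre_ (junk default 0 there)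
  let m : Nat := PySem.Int.bitLength ((PySem.List.max? a (fun y => y)).getD 0)
  let v : Array Int := a.foldl (fun v item =>
      pyArrSetD v item (pyArrGetD v item 0 + 1)) (Array.replicate (1 <<< m) 0)
  let v2 : Array Int := (PySem.List.pyRange 0 (n + 1) 1).foldl
      (fun v2 _ => v2.push (PySem.Int.mod (pyArrGetD v2 (-1) 0 * 2) M)) #[1]
  let nv : Array Int := zeta_super v m
  let ans : Int := (List.range (1 <<< m)).foldl (fun ans b =>
      PySem.Int.mod
        (ans + (pyArrGetD v2 (pyArrGetD nv (b : Int) 0) 0 - 1)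
                 * (-1) ^ PySem.Int.bitCount (b : Int)) M) 0
  PySem.Int.mod ans M

-- ===== PORT B =====
def count_zero_and_groups_alt (n : Int) (a : List Int) : Int :=
  let M : Int := 1000000007
  let m : Nat := PySem.Int.bitLength ((PySem.List.max? a (fun y => y)).getD 0)
  let ans : Int := (List.range (1 <<< m)).foldl (fun ans b =>
      let c : Int := a.foldl (fun c x =>
          if PySem.Int.band x (b : Int) = (b : Int) then c + 1 else c) 0
      let sign : Int := if PySem.Int.bitCount (b : Int) % 2 = 1 then -1 else 1
      -- pow(2, c, M): c is a count, hence ≥ 0, so c.toNat is exact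
      PySem.Int.mod (ans + (PySem.Int.powMod 2 c.toNat M - 1) * sign) M) 0
  PySem.Int.mod ans M

-- ===== PRECONDITION & SPEC =====
-- Pre_ is exactly where A returns: a nonempty (else max() raises ValueError), len(a) ≤ n+1 (else
-- v2[nv[0]] raises IndexError), and every element ≥ -2^(max(a).bit_length()) (else v[item]
-- raises IndexError; in-range negatives index v via Python wraparound and are INCLUDED here).
def Pre_count_zero_and_groups (n : Int) (a : List Int) : Prop :=
  a ≠ [] ∧ (a.length : Int) ≤ n + 1 ∧
  ∀ x ∈ a, -((2 : Int) ^ PySem.Int.bitLength ((PySem.List.max? a (fun y => y)).getD 0)) ≤ x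
instance (n : Int) (a : List Int) : Decidable (Pre_count_zero_and_groups n a) := by
  unfold Pre_count_zero_and_groups; infer_instance

def pvWitness_count_zero_and_groups : Int × List Int := (3, [1, 2, 3])


def Spec_count_zero_and_groups (n : Int) (a : List Int) (out : Int) : Prop := out = count_zero_and_groups_alt n a
instance (n : Int) (a : List Int) (out : Int) : Decidable (Spec_count_zero_and_groups n a out) := by unfold Spec_count_zero_and_groups; infer_instance

-- ===== CLAIM (what is proved, stated in full; the proofs are below) =====
def Claim_equal_count_zero_and_groups : Prop := ∀ (n : Int) (a : List Int), Dom_count_zero_and_groups n a → Pre_count_zero_and_groups n a → Spec_count_zero_and_groups n a (count_zero_and_groups n a)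


-- ===== LEMMAS AND PROOFS =====

-- index actually written in Python's v[item] (wraparound for a negative item)
def keyIdx (m : Nat) (x : Int) : Nat := if x < 0 then 2 ^ m - (-x).toNat else x.toNat

-- the predicate maintained by the zeta transform after i passes:
-- x agrees with j on bits ≥ i and dominates j on bits < i
def Qb (i j y : Nat) : Bool := (y >>> i == j >>> i) && (((j % 2 ^ i) &&& y) == j % 2 ^ i)

lemma cond_iff (j i : Nat) : ((j >>> i) &&& 1 = 0) ↔ j.testBit i = false := by
  simp [Nat.testBit, Nat.and_one_is_mod]

lemma pyIdx_key (m : Nat) (x : Int) (hlo : -((2:Int) ^ m) ≤ x) (hhi : x < (2:Int) ^ m) :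
    PySem.List.pyIdx? (2 ^ m) x = some (keyIdx m x) ∧ keyIdx m x < 2 ^ m := by
  have h2 : ((2:Int) ^ m) = ((2 ^ m : Nat) : Int) := by push_cast; ring
  rw [h2] at hlo hhi
  have hp : 1 ≤ 2 ^ m := Nat.one_le_two_pow
  unfold PySem.List.pyIdx? keyIdx
  by_cases hx : x < 0
  · rw [if_neg (by omega), if_pos (by omega), if_pos hx]
    exact ⟨rfl, by omega⟩
  · rw [if_pos (by omega), if_pos (by omega), if_neg hx]
    exact ⟨rfl, by omega⟩

lemma pyIdx_natCast (N j : Nat) (h : j < N) : PySem.List.pyIdx? N (j : Int) = some j := by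
  unfold PySem.List.pyIdx?
  rw [if_pos (by omega), if_pos (by exact_mod_cast h)]
  simp

lemma pyIdx_neg_one (N : Nat) (h : 0 < N) : PySem.List.pyIdx? N (-1) = some (N - 1) := by
  unfold PySem.List.pyIdx?
  rw [if_neg (by omega), if_pos (by omega)]
  rfl

lemma pyArrSetD_of_idx {v : Array Int} {i : Int} {k : Nat} (h : PySem.List.pyIdx? v.size i = some k)
    (x : Int) : pyArrSetD v i x = v.setIfInBounds k x := by
  unfold pyArrSetD
  rw [h]

lemma pyArrGetD_of_idx {v : Array Int} {i : Int} {k : Nat} (h : PySem.List.pyIdx? v.size i = some k)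
    (d : Int) : pyArrGetD v i d = v.getD k d := by
  unfold pyArrGetD
  rw [h]

lemma getD_setIfInBounds (xs : Array Int) (k j : Nat) (w d : Int) :
    (xs.setIfInBounds k w).getD j d = if k = j ∧ k < xs.size then w else xs.getD j d := by
  rw [Array.getD_eq_getD_getElem?, Array.getD_eq_getD_getElem?, Array.getElem?_setIfInBounds]
  by_cases h1 : k = j
  · subst h1
    by_cases h2 : k < xs.size
    · rw [if_pos rfl, if_pos h2, if_pos ⟨rfl, h2⟩]
      rfl
    · rw [if_pos rfl, if_neg h2, if_neg (by tauto)]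
      rw [Array.getElem?_eq_none (by omega)]
  · rw [if_neg h1, if_neg (by tauto)]

-- counting along a disjoint union of predicates
lemma countP_split (l : List Int) (p q r : Int → Bool)
    (h : ∀ x ∈ l, (p x = (q x || r x)) ∧ ¬(q x = true ∧ r x = true)) :
    l.countP p = l.countP q + l.countP r := by
  induction l with
  | nil => simp
  | cons x t ih =>
    have hx := h x (by simp)
    have ht := ih (fun y hy => h y (by simp [hy]))
    simp only [List.countP_cons, hx.1]
    rcases hq : q x <;> rcases hr : r x <;> simp_all <;> omega

-- ===== the count array v =====

lemma buildV_spec (m : Nat) (a : List Int)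
    (hx : ∀ x ∈ a, PySem.List.pyIdx? (2 ^ m) x = some (keyIdx m x) ∧ keyIdx m x < 2 ^ m) :
    ∀ v : Array Int, v.size = 2 ^ m →
      (a.foldl (fun v item => pyArrSetD v item (pyArrGetD v item 0 + 1)) v).size = 2 ^ m ∧
      ∀ j, j < 2 ^ m →
        (a.foldl (fun v item => pyArrSetD v item (pyArrGetD v item 0 + 1)) v).getD j 0
          = v.getD j 0 + (a.countP (fun x => keyIdx m x == j) : Int) := by
  induction a with
  | nil =>
    intro v hv
    refine ⟨hv, ?_⟩
    intro j hj
    simp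
  | cons x t ih =>
    intro v hv
    have hxk := hx x (by simp)
    have hset : pyArrSetD v x (pyArrGetD v x 0 + 1)
        = v.setIfInBounds (keyIdx m x) (v.getD (keyIdx m x) 0 + 1) := by
      rw [pyArrGetD_of_idx (by rw [hv]; exact hxk.1), pyArrSetD_of_idx (by rw [hv]; exact hxk.1)]
    have hlen : (v.setIfInBounds (keyIdx m x) (v.getD (keyIdx m x) 0 + 1)).size = 2 ^ m := by
      simp [Array.size_setIfInBounds, hv]
    obtain ⟨hl, hg⟩ := ih (fun y hy => hx y (by simp [hy])) _ hlen
    refine ⟨by simpa [hset] using hl, ?_⟩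
    intro j hj
    simp only [List.foldl_cons, hset]
    rw [hg j hj, getD_setIfInBounds]
    simp only [List.countP_cons]
    by_cases he : keyIdx m x = j
    · rw [if_pos ⟨he, by omega⟩]
      simp only [he, beq_self_eq_true, if_true]
      push_cast
      ring
    · rw [if_neg (by tauto)]
      simp [he]

-- ===== the zeta transform =====

lemma zetaInner_spec (i m : Nat) (hi : i < m) (out : Array Int) (h : out.size = 2 ^ m) :
    (zetaInner i (2 ^ m) out).size = 2 ^ m ∧
    ∀ j, j < 2 ^ m → (zetaInner i (2 ^ m) out).getD j 0 =
      if j.testBit i = false then out.getD j 0 + out.getD (j ^^^ 2 ^ i) 0 else out.getD j 0 := by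
  have h2i : (1 <<< i : Nat) = 2 ^ i := by rw [Nat.shiftLeft_eq, one_mul]
  have key : ∀ k, k ≤ 2 ^ m →
      ((List.range k).foldl (zetaStep i) out).size = 2 ^ m ∧
      ∀ j, j < 2 ^ m → ((List.range k).foldl (zetaStep i) out).getD j 0 =
        if j < k ∧ j.testBit i = false then out.getD j 0 + out.getD (j ^^^ 2 ^ i) 0 else out.getD j 0 := by
    intro k
    induction k with
    | zero =>
      intro _
      refine ⟨by simpa using h, ?_⟩
      intro j hj; simp
    | succ k ihk =>
      intro hk
      obtain ⟨hl, hg⟩ := ihk (by omega)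
      rw [List.range_succ, List.foldl_append, List.foldl_cons, List.foldl_nil]
      set s := (List.range k).foldl (zetaStep i) out with hs
      by_cases hb : k.testBit i = false
      · have hkm : k < 2 ^ m := by omega
        have hq : k ^^^ 2 ^ i < 2 ^ m :=
          Nat.xor_lt_two_pow hkm (Nat.pow_lt_pow_right (by norm_num) hi)
        have hqbit : (k ^^^ 2 ^ i).testBit i = true := by
          rw [Nat.testBit_xor, hb, Nat.testBit_two_pow]; simp
        have hgk : s.getD k 0 = out.getD k 0 := by
          rw [hg k hkm]; simp
        have hgq : s.getD (k ^^^ 2 ^ i) 0 = out.getD (k ^^^ 2 ^ i) 0 := by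
          rw [hg _ hq]; simp [hqbit]
        have hstep : zetaStep i s k = s.setIfInBounds k (s.getD k 0 + s.getD (k ^^^ 2 ^ i) 0) := by
          rw [zetaStep, if_pos ((cond_iff k i).mpr hb), h2i]
        rw [hstep]
        refine ⟨by simp [Array.size_setIfInBounds, hl], ?_⟩
        intro j hj
        rw [getD_setIfInBounds, hgk, hgq]
        by_cases hjk : k = j
        · subst hjk
          rw [if_pos ⟨rfl, by omega⟩, if_pos ⟨by omega, hb⟩]
        · rw [if_neg (by tauto), hg j hj]
          have heq : (j < k + 1 ∧ j.testBit i = false) ↔ (j < k ∧ j.testBit i = false) := by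
            constructor
            · rintro ⟨h1, h2⟩; exact ⟨by omega, h2⟩
            · rintro ⟨h1, h2⟩; exact ⟨by omega, h2⟩
          rw [if_congr heq rfl rfl]
      · have hbt : k.testBit i = true := by revert hb; cases k.testBit i <;> simp
        have hstep : zetaStep i s k = s := by
          rw [zetaStep, if_neg (fun hc => hb ((cond_iff k i).mp hc))]
        rw [hstep]
        refine ⟨hl, ?_⟩
        intro j hj
        rw [hg j hj]
        have heq : (j < k + 1 ∧ j.testBit i = false) ↔ (j < k ∧ j.testBit i = false) := by
          constructor
          · rintro ⟨h1, h2⟩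
            refine ⟨?_, h2⟩
            rcases Nat.lt_or_ge j k with h' | h'
            · exact h'
            · exfalso
              have hjke : j = k := by omega
              subst hjke
              rw [hbt] at h2; exact absurd h2 (by simp)
          · rintro ⟨h1, h2⟩; exact ⟨by omega, h2⟩
        rw [if_congr heq rfl rfl]
  have hfin := key (2 ^ m) (le_refl _)
  refine ⟨hfin.1, ?_⟩
  intro j hj
  have h2 := hfin.2 j hj
  simp only [hj, true_and] at h2
  unfold zetaInner
  exact h2

-- characterisation of Qb via testBit
lemma Qb_iff (i j y : Nat) : Qb i j y = true ↔
    (∀ t, i ≤ t → y.testBit t = j.testBit t) ∧ (∀ t, t < i → j.testBit t = true → y.testBit t = true) := by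
  unfold Qb
  rw [Bool.and_eq_true, beq_iff_eq, beq_iff_eq]
  constructor
  · rintro ⟨h1, h2⟩
    constructor
    · intro t ht
      have hc := congrArg (fun z => Nat.testBit z (t - i)) h1
      simpa [Nat.testBit_shiftRight, Nat.add_sub_cancel' ht] using hc
    · intro t ht hj
      have hc := congrArg (fun z => Nat.testBit z t) h2
      simp only [Nat.testBit_and, Nat.testBit_mod_two_pow] at hc
      rw [hj] at hc
      simpa [ht] using hc
  · rintro ⟨h1, h2⟩
    constructor
    · apply Nat.eq_of_testBit_eq
      intro t
      rw [Nat.testBit_shiftRight, Nat.testBit_shiftRight]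
      exact h1 (i + t) (by omega)
    · apply Nat.eq_of_testBit_eq
      intro t
      simp only [Nat.testBit_and, Nat.testBit_mod_two_pow]
      by_cases ht : t < i
      · by_cases hj : j.testBit t = true
        · simp [ht, hj, h2 t ht hj]
        · have hjf : j.testBit t = false := by revert hj; cases j.testBit t <;> simp
          simp [ht, hjf]
      · simp [ht]

lemma testBit_xor_pow (j i t : Nat) : (j ^^^ 2 ^ i).testBit t = (j.testBit t ^^ decide (i = t)) := by
  rw [Nat.testBit_xor, Nat.testBit_two_pow]

-- zeta step characterisation, bit i of j clear
lemma Qb_step_clear (i j y : Nat) (hj : j.testBit i = false) :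
    (Qb (i + 1) j y = (Qb i j y || Qb i (j ^^^ 2 ^ i) y)) ∧
    ¬(Qb i j y = true ∧ Qb i (j ^^^ 2 ^ i) y = true) := by
  have hq : ∀ t, (j ^^^ 2 ^ i).testBit t = (j.testBit t ^^ decide (i = t)) := testBit_xor_pow j i
  constructor
  · rw [Bool.eq_iff_iff, Bool.or_eq_true, Qb_iff, Qb_iff, Qb_iff]
    constructor
    · rintro ⟨h1, h2⟩
      by_cases hy : y.testBit i = true
      · right
        constructor
        · intro t ht
          rcases Nat.eq_or_lt_of_le ht with he | hl
          · rw [hq, ← he, hy, hj]; simp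
          · rw [hq]
            have hne : ¬ (i = t) := by omega
            simp only [hne, decide_false, Bool.xor_false]
            exact h1 t (by omega)
        · intro t ht hjt
          rw [hq] at hjt
          have hne : ¬ (i = t) := by omega
          simp only [hne, decide_false, Bool.xor_false] at hjt
          exact h2 t (by omega) hjt
      · left
        constructor
        · intro t ht
          rcases Nat.eq_or_lt_of_le ht with he | hl
          · rw [← he, hj]; revert hy; cases y.testBit i <;> simp
          · exact h1 t (by omega)
        · intro t ht hjt
          exact h2 t (by omega) hjt
    · rintro (⟨h1, h2⟩ | ⟨h1, h2⟩)
      · constructor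
        · intro t ht; exact h1 t (by omega)
        · intro t ht hjt
          rcases Nat.lt_or_ge t i with hl | hg
          · exact h2 t hl hjt
          · have hti : t = i := by omega
            subst hti
            rw [h1 t (le_refl _)]; exact hjt
      · constructor
        · intro t ht
          have hc := h1 t (by omega)
          rw [hq] at hc
          have hne : ¬ (i = t) := by omega
          simpa [hne] using hc
        · intro t ht hjt
          rcases Nat.lt_or_ge t i with hl | hg
          · apply h2 t hl
            rw [hq]
            have hne : ¬ (i = t) := by omega
            simpa [hne] using hjt
          · have hti : t = i := by omega
            subst hti
            rw [hj] at hjt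
            exact absurd hjt (by simp)
  · rintro ⟨ha, hb⟩
    rw [Qb_iff] at ha hb
    have h1 := ha.1 i (le_refl _)
    have h2 := hb.1 i (le_refl _)
    rw [hq] at h2
    rw [h1] at h2
    simp [hj] at h2

-- zeta step characterisation, bit i of j set
lemma Qb_step_set (i j y : Nat) (hj : j.testBit i = true) :
    Qb (i + 1) j y = Qb i j y := by
  rw [Bool.eq_iff_iff, Qb_iff, Qb_iff]
  constructor
  · rintro ⟨h1, h2⟩
    constructor
    · intro t ht
      rcases Nat.eq_or_lt_of_le ht with he | hl
      · rw [← he, hj]; exact h2 i (by omega) hj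
      · exact h1 t (by omega)
    · intro t ht hjt; exact h2 t (by omega) hjt
  · rintro ⟨h1, h2⟩
    constructor
    · intro t ht; exact h1 t (by omega)
    · intro t ht hjt
      rcases Nat.lt_or_ge t i with hl | hg
      · exact h2 t hl hjt
      · have hti : t = i := by omega
        subst hti
        rw [h1 t (le_refl _)]; exact hjt

lemma Qb_zero (j y : Nat) : Qb 0 j y = (y == j) := by
  rw [Bool.eq_iff_iff, Qb_iff, beq_iff_eq]
  constructor
  · rintro ⟨h1, _⟩
    exact Nat.eq_of_testBit_eq (fun t => h1 t (by omega))
  · rintro rfl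
    exact ⟨fun t _ => rfl, fun t ht h => h⟩

lemma Qb_final (m j y : Nat) (hj : j < 2 ^ m) (hy : y < 2 ^ m) :
    Qb m j y = true ↔ j &&& y = j := by
  rw [Qb_iff]
  constructor
  · rintro ⟨_, h2⟩
    apply Nat.eq_of_testBit_eq
    intro t
    rw [Nat.testBit_and]
    by_cases ht : t < m
    · by_cases hjt : j.testBit t = true
      · simp [hjt, h2 t ht hjt]
      · have hjf : j.testBit t = false := by revert hjt; cases j.testBit t <;> simp
        simp [hjf]
    · have hjf : j.testBit t = false :=
        Nat.testBit_lt_two_pow (lt_of_lt_of_le hj (Nat.pow_le_pow_right (by norm_num) (by omega)))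
      simp [hjf]
  · intro h
    constructor
    · intro t ht
      have hyt : y.testBit t = false :=
        Nat.testBit_lt_two_pow (lt_of_lt_of_le hy (Nat.pow_le_pow_right (by norm_num) ht))
      have hjt : j.testBit t = false :=
        Nat.testBit_lt_two_pow (lt_of_lt_of_le hj (Nat.pow_le_pow_right (by norm_num) ht))
      rw [hyt, hjt]
    · intro t ht hjt
      have hc := congrArg (fun z => Nat.testBit z t) h
      simp only [Nat.testBit_and] at hc
      rw [hjt] at hc
      simpa using hc

-- the zeta transform computes superset counts of the key multiset
lemma zeta_spec (m : Nat) (a : List Int) (v : Array Int) (hv : v.size = 2 ^ m)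
    (hg : ∀ j, j < 2 ^ m → v.getD j 0 = (a.countP (fun x => keyIdx m x == j) : Int)) :
    (zeta_super v m).size = 2 ^ m ∧
    ∀ j, j < 2 ^ m → (zeta_super v m).getD j 0 = (a.countP (fun x => Qb m j (keyIdx m x)) : Int) := by
  have h2m : (1 <<< m : Nat) = 2 ^ m := by rw [Nat.shiftLeft_eq, one_mul]
  have key : ∀ i, i ≤ m →
      ((List.range i).foldl (fun out t => zetaInner t (2 ^ m) out) v).size = 2 ^ m ∧
      ∀ j, j < 2 ^ m → ((List.range i).foldl (fun out t => zetaInner t (2 ^ m) out) v).getD j 0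
        = (a.countP (fun x => Qb i j (keyIdx m x)) : Int) := by
    intro i
    induction i with
    | zero =>
      intro _
      refine ⟨by simpa using hv, ?_⟩
      intro j hj
      simp only [List.range_zero, List.foldl_nil]
      rw [hg j hj]
      congr 1
      apply List.countP_congr
      intro x _
      rw [Qb_zero]
    | succ i ihi =>
      intro hi
      obtain ⟨hl, hgi⟩ := ihi (by omega)
      rw [List.range_succ, List.foldl_append, List.foldl_cons, List.foldl_nil]
      obtain ⟨hl', hg'⟩ := zetaInner_spec i m (by omega) _ hl
      refine ⟨hl', ?_⟩
      intro j hj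
      rw [hg' j hj]
      by_cases hb : j.testBit i = false
      · rw [if_pos hb]
        have hq : j ^^^ 2 ^ i < 2 ^ m :=
          Nat.xor_lt_two_pow hj (Nat.pow_lt_pow_right (by norm_num) (by omega))
        rw [hgi j hj, hgi _ hq]
        have hsplit : a.countP (fun x => Qb (i+1) j (keyIdx m x))
            = a.countP (fun x => Qb i j (keyIdx m x)) + a.countP (fun x => Qb i (j ^^^ 2 ^ i) (keyIdx m x)) :=
          countP_split a _ _ _ (fun x _ => Qb_step_clear i j (keyIdx m x) hb)
        rw [hsplit]
        push_cast
        ring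
      · rw [if_neg hb]
        rw [hgi j hj]
        congr 1
        apply List.countP_congr
        intro x _
        rw [Qb_step_set i j (keyIdx m x) (by revert hb; cases j.testBit i <;> simp)]
  refine ⟨?_, ?_⟩
  · rw [zeta_super]
    simp only [h2m]
    exact (key m (le_refl m)).1
  · intro j hj
    rw [zeta_super]
    simp only [h2m]
    exact (key m (le_refl m)).2 j hj

-- complementary bits: if u + w = 2^m - 1 then u and w have opposite bits below m
lemma compl_bits (m : Nat) : ∀ u w : Nat, u + w = 2 ^ m - 1 →
    ∀ t, t < m → u.testBit t = !w.testBit t := by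
  induction m with
  | zero => intro u w h t ht; omega
  | succ m ihm =>
    intro u w h t ht
    have h1 : 1 ≤ 2 ^ m := Nat.one_le_two_pow
    have hpow : 2 ^ (m + 1) = 2 * 2 ^ m := by ring
    have hodd : u % 2 + w % 2 = 1 := by omega
    cases t with
    | zero =>
      rw [Nat.testBit_zero, Nat.testBit_zero]
      rcases (by omega : u % 2 = 0 ∧ w % 2 = 1 ∨ u % 2 = 1 ∧ w % 2 = 0) with ⟨ha, hb⟩ | ⟨ha, hb⟩ <;>
        simp [ha, hb]
    | succ t =>
      rw [Nat.testBit_succ, Nat.testBit_succ]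
      exact ihm (u / 2) (w / 2) (by omega) t (by omega)

-- if u and w are bitwise complementary below m then "j misses u" ⇔ "j inside w", for j < 2^m
lemma and_compl_iff (m j u w : Nat) (hj : j < 2 ^ m)
    (hc : ∀ t, t < m → u.testBit t = !w.testBit t) :
    j &&& u = 0 ↔ j &&& w = j := by
  have hjf : ∀ t, ¬ t < m → j.testBit t = false := fun t ht =>
    Nat.testBit_lt_two_pow (lt_of_lt_of_le hj (Nat.pow_le_pow_right (by norm_num) (by omega)))
  constructor
  · intro h
    apply Nat.eq_of_testBit_eq
    intro t
    rw [Nat.testBit_and]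
    by_cases ht : t < m
    · by_cases hjt : j.testBit t = true
      · have h0 := congrArg (fun z => Nat.testBit z t) h
        simp only [Nat.testBit_and, Nat.zero_testBit] at h0
        rw [hjt] at h0
        simp only [Bool.true_and] at h0
        have hw : w.testBit t = true := by
          have hcc := hc t ht
          rw [h0] at hcc
          revert hcc; cases w.testBit t <;> simp
        simp [hjt, hw]
      · have hjtf : j.testBit t = false := by revert hjt; cases j.testBit t <;> simp
        simp [hjtf]
    · simp [hjf t ht]
  · intro h
    apply Nat.eq_of_testBit_eq
    intro t
    rw [Nat.testBit_and, Nat.zero_testBit]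
    by_cases ht : t < m
    · by_cases hjt : j.testBit t = true
      · have h0 := congrArg (fun z => Nat.testBit z t) h
        simp only [Nat.testBit_and] at h0
        rw [hjt] at h0
        simp only [Bool.true_and] at h0
        have hu : u.testBit t = false := by
          have hcc := hc t ht
          rw [h0] at hcc
          simpa using hcc
        simp [hjt, hu]
      · have hjtf : j.testBit t = false := by revert hjt; cases j.testBit t <;> simp
        simp [hjtf]
    · simp [hjf t ht]

-- B's membership test agrees with the key/AND test on A's side
lemma band_key (m : Nat) (j : Nat) (hj : j < 2 ^ m) (x : Int)
    (hlo : -((2:Int) ^ m) ≤ x) (hhi : x < (2:Int) ^ m) :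
    (PySem.Int.band x (j : Int) = (j : Int)) ↔ j &&& keyIdx m x = j := by
  have h2 : ((2:Int) ^ m) = ((2 ^ m : Nat) : Int) := by push_cast; ring
  have hp : 1 ≤ 2 ^ m := Nat.one_le_two_pow
  by_cases hx : 0 ≤ x
  · have hxe : x = ((x.toNat : Nat) : Int) := by omega
    rw [hxe, PySem.Int.band_natCast]
    rw [keyIdx, if_neg (by omega)]
    constructor
    · intro h
      have h' : x.toNat &&& j = j := by exact_mod_cast h
      rw [Nat.land_comm] at h'; exact h'
    · intro h
      rw [Nat.land_comm] at h
      exact_mod_cast congrArg (fun z : Nat => (z : Int)) h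
  · have hxneg : x < 0 := by omega
    rw [h2] at hlo
    set u : Nat := (-x - 1).toNat with hu
    have hband : PySem.Int.band x (j : Int) = ((j - (j &&& u) : Nat) : Int) := by
      unfold PySem.Int.band
      rw [if_neg (by omega), if_pos (by positivity)]
      simp only [Int.toNat_natCast]
      rw [← hu]
    have hkey : keyIdx m x = 2 ^ m - 1 - u := by
      rw [keyIdx, if_pos hxneg]
      omega
    have husum : u + keyIdx m x = 2 ^ m - 1 := by rw [hkey]; omega
    have hcompl := compl_bits m u (keyIdx m x) husum
    have hle : j &&& u ≤ j := Nat.and_le_left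
    rw [hband]
    constructor
    · intro h
      have h' : j - (j &&& u) = j := by exact_mod_cast h
      exact (and_compl_iff m j u (keyIdx m x) hj hcompl).mp (by omega)
    · intro h
      have hz : j &&& u = 0 := (and_compl_iff m j u (keyIdx m x) hj hcompl).mpr h
      rw [hz]
      simp

-- ===== the power table v2 =====

lemma v2_last (M : Int) (k : Nat) :
    pyArrGetD ((List.range (k+1)).map (fun t => (2:Int) ^ t % M)).toArray (-1) 0
      = (2:Int) ^ k % M := by
  have hsize : ((List.range (k+1)).map (fun t => (2:Int) ^ t % M)).toArray.size = k + 1 := by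
    simp
  rw [pyArrGetD_of_idx (by rw [hsize]; exact pyIdx_neg_one (k+1) (by omega))]
  rw [Array.getD_eq_getD_getElem?, List.getElem?_toArray, ← List.getD_eq_getElem?_getD]
  rw [show k + 1 - 1 = k by omega, PySem.List.getD_map_range _ _ _ _ (by omega)]

lemma v2_fold (M : Int) (hM : 0 < M) (l : List Int) :
    ∀ k : Nat, l.foldl (fun v2 _ => v2.push (PySem.Int.mod (pyArrGetD v2 (-1) 0 * 2) M))
        ((List.range (k+1)).map (fun t => (2:Int) ^ t % M)).toArray
      = ((List.range (k + l.length + 1)).map (fun t => (2:Int) ^ t % M)).toArray := by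
  induction l with
  | nil => intro k; simp
  | cons x t ih =>
    intro k
    rw [List.foldl_cons]
    have hval : PySem.Int.mod ((2:Int) ^ k % M * 2) M = (2:Int) ^ (k+1) % M := by
      rw [PySem.Int.mod_eq_emod_of_pos hM, pow_succ]
      conv_rhs => rw [Int.mul_emod]
      rw [Int.mul_emod ((2:Int) ^ k % M) 2 M, Int.emod_emod_of_dvd _ dvd_rfl]
    have hstep : ((List.range (k+1)).map (fun t => (2:Int) ^ t % M)).toArray.push
          (PySem.Int.mod (pyArrGetD ((List.range (k+1)).map (fun t => (2:Int) ^ t % M)).toArray (-1) 0 * 2) M)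
        = ((List.range (k+2)).map (fun t => (2:Int) ^ t % M)).toArray := by
      rw [v2_last, hval, List.push_toArray, List.range_succ (n := k+1), List.map_append]
      rfl
    rw [hstep]
    have hrec := ih (k+1)
    rw [hrec]
    congr 3
    simp only [List.length_cons]
    omega

-- the sign factor
lemma sign_eq (K : Nat) : ((-1 : Int)) ^ K = if K % 2 = 1 then -1 else 1 := by
  rcases Nat.even_or_odd K with he | ho
  · have h0 : K % 2 = 0 := Nat.even_iff.mp he
    rw [Even.neg_one_pow he, if_neg (by omega)]
  · rw [Odd.neg_one_pow ho, if_pos (Nat.odd_iff.mp ho)]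

-- ===== the main equivalence =====

lemma main_equiv (n : Int) (a : List Int) (hpre : Pre_count_zero_and_groups n a) :
    count_zero_and_groups n a = count_zero_and_groups_alt n a := by
  obtain ⟨hne, hlen, hbound⟩ := hpre
  simp only [count_zero_and_groups, count_zero_and_groups_alt]
  set mx : Int := (PySem.List.max? a (fun y => y)).getD 0 with hmx
  set m : Nat := PySem.Int.bitLength mx with hm
  have h2m : (1 <<< m : Nat) = 2 ^ m := by rw [Nat.shiftLeft_eq, one_mul]
  rw [h2m]
  -- facts about max(a)
  obtain ⟨mx', hmx'⟩ : ∃ mx', PySem.List.max? a (fun y => y) = some mx' := by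
    cases hq : PySem.List.max? a (fun y => y) with
    | none =>
      exfalso
      apply hne
      exact (PySem.List.max?_eq_none_iff a (fun y => y)).mp hq
    | some z => exact ⟨z, rfl⟩
  have hmax : ∀ x ∈ a, x ≤ mx := by
    intro x hx
    have := PySem.List.max?_isMax hmx' x hx
    rw [hmx, hmx']
    exact this
  have hhi : ∀ x ∈ a, x < (2:Int) ^ m := by
    intro x hx
    have h1 : x ≤ mx := hmax x hx
    have h2 : mx.natAbs < 2 ^ m := by rw [hm]; exact PySem.Int.lt_two_pow_bitLength mx
    have h3 : ((2:Int) ^ m) = ((2 ^ m : Nat) : Int) := by push_cast; ring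
    rw [h3]; omega
  have hlo : ∀ x ∈ a, -((2:Int) ^ m) ≤ x := fun x hx => hbound x hx
  have hidx : ∀ x ∈ a, PySem.List.pyIdx? (2 ^ m) x = some (keyIdx m x) ∧ keyIdx m x < 2 ^ m :=
    fun x hx => pyIdx_key m x (hlo x hx) (hhi x hx)
  -- the count array and zeta transform
  obtain ⟨hvlen, hvget⟩ := buildV_spec m a hidx (Array.replicate (2 ^ m) 0) (by simp)
  obtain ⟨hnvlen, hnv⟩ := zeta_spec m a _ hvlen (by
    intro j hj
    rw [hvget j hj]
    simp [Array.getD_eq_getD_getElem?, hj])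
  -- the power table
  have hM : (0:Int) < 1000000007 := by norm_num
  have hbase : (#[1] : Array Int) = ((List.range 1).map (fun t => (2:Int) ^ t % 1000000007)).toArray := by
    norm_num [List.range_one]
  have hv2 : (PySem.List.pyRange 0 (n + 1) 1).foldl
      (fun v2 _ => v2.push (PySem.Int.mod (pyArrGetD v2 (-1) 0 * 2) (1000000007 : Int))) #[1]
      = ((List.range ((n + 1).toNat + 1)).map (fun t => (2:Int) ^ t % 1000000007)).toArray := by
    rw [hbase, v2_fold 1000000007 hM (PySem.List.pyRange 0 (n + 1) 1) 0]
    congr 3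
    rw [PySem.List.length_pyRange_one]
    omega
  rw [hv2]
  -- compare the two answer folds term by term
  congr 1
  apply PySem.List.foldl_congr_mem
  intro acc b hb
  obtain ⟨bn, hbm, rfl⟩ : ∃ a' : Nat, a' < 2 ^ m ∧ b = (a' : Int) := by simpa using hb
  set cnt : Nat := a.countP (fun x => Qb m bn (keyIdx m x)) with hcnt
  have hcntle : cnt ≤ (n + 1).toNat := by
    have h1 : cnt ≤ a.length := List.countP_le_length
    omega
  -- A's superset count equals cnt
  have hnvb : pyArrGetD (zeta_super (a.foldl (fun v item =>
      pyArrSetD v item (pyArrGetD v item 0 + 1)) (Array.replicate (2 ^ m) 0)) m) (bn : Int) 0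
      = (cnt : Int) := by
    rw [pyArrGetD_of_idx (by rw [hnvlen]; exact pyIdx_natCast (2 ^ m) bn hbm)]
    exact hnv bn hbm
  rw [hnvb]
  -- A's power-table lookup
  have hpow : pyArrGetD ((List.range ((n + 1).toNat + 1)).map (fun t => (2:Int) ^ t % 1000000007)).toArray
      ((cnt : Nat) : Int) 0 = (2:Int) ^ cnt % 1000000007 := by
    have hsize : ((List.range ((n + 1).toNat + 1)).map (fun t => (2:Int) ^ t % 1000000007)).toArray.size
        = (n + 1).toNat + 1 := by simp
    rw [pyArrGetD_of_idx (by rw [hsize]; exact pyIdx_natCast _ cnt (by omega))]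
    rw [Array.getD_eq_getD_getElem?, List.getElem?_toArray, ← List.getD_eq_getElem?_getD]
    rw [PySem.List.getD_map_range _ _ _ _ (by omega)]
  rw [hpow]
  -- B's rescan count equals cnt
  have hc : a.foldl (fun c x => if PySem.Int.band x (bn : Int) = (bn : Int) then c + 1 else c) 0
      = (cnt : Int) := by
    rw [PySem.List.foldl_ite_add_one (fun x => PySem.Int.band x (bn : Int) = (bn : Int)) a 0]
    rw [zero_add]
    congr 1
    apply List.countP_congr
    intro x hx
    rw [decide_eq_true_iff]
    rw [band_key m bn hbm x (hlo x hx) (hhi x hx)]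
    rw [← Qb_final m bn (keyIdx m x) hbm (hidx x hx).2]
  rw [hc]
  have htn : ((cnt : Int)).toNat = cnt := by simp
  rw [htn]
  -- B's modular power
  have hpm : PySem.Int.powMod 2 cnt 1000000007 = (2:Int) ^ cnt % 1000000007 := by
    rw [PySem.Int.powMod_eq, PySem.Int.mod_eq_emod_of_pos hM]
  rw [hpm]
  -- the sign
  rw [sign_eq]

-- ===== VERDICT (by name: the statement is the Claim_ definition above) =====
theorem count_zero_and_groups_spec : Claim_equal_count_zero_and_groups := by
  intro n a _ hpre
  unfold Spec_count_zero_and_groups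
  exact main_equiv n a hpre
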